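-- pv_equiv track=rewrite | github.com/raj713335/LeetCode | Easy/1933 Check if String Is Decomposable Into Value-Equal Substrings.py | isDecomposable
-- ===== SOURCE A (Python) =====
-- def isDecomposable(s: str) -> bool:
--
--     prev = s[0]
--     count = 1
--     flag = True
--
--     for i in range(1, len(s)):
--         if s[i] == prev:
--             count += 1
--             if count > 3:
--                 count = 1
--                 prev = s[i]
--         else:
--             if count == 1:
--                 return False
--             elif count == 2:
--                 if flag:
--                     flag = False
--                 else:
--                     return False
--
--             count = 1
--             prev = s[i]
--
--     if count == 2:
--         if flag:
--             flag = False
--         else: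
--             return False
--     elif count > 3:
--         count = count % 3
--         if count == 2:
--             if flag:
--                 flag = False
--             else:
--                 return False
--         else:
--             return False
--     elif count == 1:
--         return False
--
--     if flag:
--         return False
--     else:
--         return True
-- ===== SOURCE B (Python) =====
-- def isDecomposable(s: str) -> bool:
--     # Backward dynamic program over suffixes, one reverse pass with rolling state:
--     # u_k = "s[i+k:] splits into equal-char triples" (out of range = False, empty = True),
--     # f_k = "s[i+k:] splits into equal-char triples plus exactly one equal pair".
--     c1 = c2 = ''
--     u1, u2, u3 = True, False, False
--     f1, f2, f3 = False, False, False
--     for c in reversed(s):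
--         u0 = c == c1 == c2 and u3
--         f0 = (c == c1 and u2) or (c == c1 == c2 and f3)
--         c1, c2 = c, c1
--         u1, u2, u3 = u0, u1, u2
--         f1, f2, f3 = f0, f1, f2
--     return f1
-- ===== Notes on version B (the rewrite author's own statement) =====
-- stated objective: alternative
-- what changed: Replaced A's forward run-length state machine (prev/count/flag with duplicated end-of-string logic) by a backward dynamic program over suffixes: one reverse pass keeps rolling DP flags recording whether the current suffix splits into equal-char triples and whether it splits into triples plus exactly one equal pair, and returns the latter flag for the whole string.
import Mathlib
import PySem

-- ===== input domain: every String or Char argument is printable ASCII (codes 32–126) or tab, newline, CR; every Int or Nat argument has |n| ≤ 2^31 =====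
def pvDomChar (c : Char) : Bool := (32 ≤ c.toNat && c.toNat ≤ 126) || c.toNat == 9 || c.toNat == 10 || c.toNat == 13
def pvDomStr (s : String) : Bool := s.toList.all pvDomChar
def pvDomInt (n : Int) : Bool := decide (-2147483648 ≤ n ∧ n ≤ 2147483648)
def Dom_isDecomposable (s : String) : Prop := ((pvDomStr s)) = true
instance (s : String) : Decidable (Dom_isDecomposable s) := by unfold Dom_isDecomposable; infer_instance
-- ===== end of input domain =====

-- B replaces A's forward prev/count/flag run-length state machine by a backward dynamic
-- program over suffixes (one reverse pass with rolling DP flags); objective: alternative.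

-- ===== PORT A =====
-- the code after A's for-loop (count is always 1, 2 or 3 here, but the dead 'count > 3' branch is ported too)
def pvFinishA (count : Int) (flag : Bool) : Bool :=
  if count == 2 then
    -- Python: if flag: flag = False (then the final 'if flag' returns True) else: return False
    (if flag then true else false)
  else if count > 3 then
    let count := PySem.Int.mod count 3
    if count == 2 then (if flag then true else false) else false
  else if count == 1 then false
  else
    -- final: if flag: return False else: return True
    (if flag then false else true)

def pvLoopA : List Char → Char → Int → Bool → Bool
  | [], _, count, flag => pvFinishA count flag
  | c :: rest, prev, count, flag =>
    if c == prev then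
      let count := count + 1
      if count > 3 then pvLoopA rest c 1 flag
      else pvLoopA rest prev count flag
    else
      if count == 1 then false
      else if count == 2 then
        (if flag then pvLoopA rest c 1 false else false)
      else pvLoopA rest c 1 flag

def isDecomposable (s : String) : Bool :=
  match s.toList with
  | [] => false   -- Python raises IndexError at s[0]; excluded by Pre_isDecomposable
  | c :: rest => pvLoopA rest c 1 true

-- ===== PORT B =====
-- Source B's loop body: rolling state (c1, c2, u1, u2, u3, f1, f2, f3); Python's initial '' (which
-- equals no character) is `none`, so `c == c1` is `some c == c1` — exact over Option Char.
def pvStepB (st : Option Char × Option Char × Bool × Bool × Bool × Bool × Bool × Bool)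
    (c : Char) : Option Char × Option Char × Bool × Bool × Bool × Bool × Bool × Bool :=
  let (c1, c2, u1, u2, u3, f1, f2, f3) := st
  let u0 := (some c == c1) && (c1 == c2) && u3
  let f0 := ((some c == c1) && u2) || ((some c == c1) && (c1 == c2) && f3)
  (some c, c1, u0, u1, u2, f0, f1, f2)

-- 'for c in reversed(s)' = fold over s.toList.reverse; the result is f1
def isDecomposable_alt (s : String) : Bool :=
  (s.toList.reverse.foldl pvStepB
    (none, none, true, false, false, false, false, false)).2.2.2.2.2.1

-- ===== PRECONDITION & SPEC =====
-- Pre_ excludes only the empty string, on which A raises IndexError (prev = s[0]).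
def Pre_isDecomposable (s : String) : Prop := s ≠ ""
instance (s : String) : Decidable (Pre_isDecomposable s) := by unfold Pre_isDecomposable; infer_instance
def pvWitness_isDecomposable : String := "aabb"

def Spec_isDecomposable (s : String) (out : Bool) : Prop := out = isDecomposable_alt s
instance (s : String) (out : Bool) : Decidable (Spec_isDecomposable s out) := by unfold Spec_isDecomposable; infer_instance

-- ===== CLAIM (what is proved, stated in full; the proofs are below) =====
def Claim_equal_isDecomposable : Prop := ∀ (s : String), Dom_isDecomposable s → Pre_isDecomposable s → Spec_isDecomposable s (isDecomposable s)

-- ===== LEMMAS AND PROOFS =====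

-- proof-only normal form: the run-length scan (remainder mod 3 of each maximal run)
def pvLoopB : List Char → Int → Bool
  | [], twos => twos == 1
  | c :: rest, twos =>
    let k := (rest.takeWhile (fun x => x == c)).length
    let r := PySem.Int.mod ((k : Int) + 1) 3
    if r == 1 then false
    else if r == 2 then
      (if twos + 1 > 1 then false else pvLoopB (rest.drop k) (twos + 1))
    else pvLoopB (rest.drop k) twos
termination_by l _ => l.length
decreasing_by all_goals (simp [List.length_drop]; try omega)

-- proof-only abstraction: 'finish a completed run of total length t, then continue with rest'
def runTail (t : Int) (twos : Int) (rest : List Char) : Bool :=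
  if t % 3 == 1 then false
  else if t % 3 == 2 then (if twos + 1 > 1 then false else pvLoopB rest (twos + 1))
  else pvLoopB rest twos

theorem runTail_congr {t1 t2 : Int} (twos : Int) (rest : List Char)
    (h : t1 % 3 = t2 % 3) : runTail t1 twos rest = runTail t2 twos rest := by
  simp [runTail, h]

theorem loopB_cons (c : Char) (rest : List Char) (twos : Int) :
    pvLoopB (c :: rest) twos =
      runTail (1 + ((rest.takeWhile (fun x => x == c)).length : Int)) twos
        (rest.drop (rest.takeWhile (fun x => x == c)).length) := by
  rw [pvLoopB, runTail]
  simp [add_comm]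

-- the A-side invariant: A's scanner in the middle of a run (partial count 'count', pair-flag
-- 'flag') equals finishing that run and continuing, with twos = (if flag then 0 else 1).
theorem loopA_eq (xs : List Char) : ∀ (prev : Char) (count : Int) (flag : Bool),
    1 ≤ count → count ≤ 3 →
    pvLoopA xs prev count flag =
      runTail (count + ((xs.takeWhile (fun x => x == prev)).length : Int))
        (if flag then 0 else 1)
        (xs.drop (xs.takeWhile (fun x => x == prev)).length) := by
  induction xs with
  | nil =>
    intro prev count flag h1 h3
    have : count = 1 ∨ count = 2 ∨ count = 3 := by omega
    rcases this with rfl | rfl | rfl <;> cases flag <;>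
      simp [pvLoopA, pvFinishA, pvLoopB, runTail]
  | cons x xs ih =>
    intro prev count flag h1 h3
    by_cases hx : x = prev
    case pos =>
      subst hx
      have htw : (x :: xs).takeWhile (fun y => y == x) = x :: xs.takeWhile (fun y => y == x) := by
        simp
      rw [htw]
      simp only [List.length_cons, List.drop_succ_cons]
      have : count = 1 ∨ count = 2 ∨ count = 3 := by omega
      rcases this with rfl | rfl | rfl
      · have hA : pvLoopA (x :: xs) x 1 flag = pvLoopA xs x 2 flag := by
          simp [pvLoopA]
        rw [hA, ih x 2 flag (by omega) (by omega)]
        exact runTail_congr _ _ (by push_cast; omega)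
      · have hA : pvLoopA (x :: xs) x 2 flag = pvLoopA xs x 3 flag := by
          simp [pvLoopA]
        rw [hA, ih x 3 flag (by omega) (by omega)]
        exact runTail_congr _ _ (by push_cast; omega)
      · have hA : pvLoopA (x :: xs) x 3 flag = pvLoopA xs x 1 flag := by
          simp [pvLoopA]
        rw [hA, ih x 1 flag (by omega) (by omega)]
        exact runTail_congr _ _ (by push_cast; omega)
    case neg =>
      have hbx : (x == prev) = false := by simp [hx]
      have htw : (x :: xs).takeWhile (fun y => y == prev) = [] := by
        simp [hbx]
      rw [htw]
      simp only [List.length_nil, Nat.cast_zero, add_zero, List.drop_zero]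
      have : count = 1 ∨ count = 2 ∨ count = 3 := by omega
      rcases this with rfl | rfl | rfl
      · simp [pvLoopA, hbx, runTail]
      · -- count = 2: boundary consumes the pair flag
        cases flag
        · simp [pvLoopA, hbx, runTail]
        · have hA : pvLoopA (x :: xs) prev 2 true = pvLoopA xs x 1 false := by
            simp [pvLoopA, hbx]
          rw [hA, ih x 1 false (by omega) (by omega)]
          have hR : runTail 2 (if (true : Bool) = true then (0:Int) else 1) (x :: xs)
              = pvLoopB (x :: xs) 1 := by simp [runTail]
          rw [hR, loopB_cons]
          simp
      · -- count = 3: clean run boundary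
        have hA : pvLoopA (x :: xs) prev 3 flag = pvLoopA xs x 1 flag := by
          simp [pvLoopA, hbx]
        rw [hA, ih x 1 flag (by omega) (by omega)]
        have hR : runTail 3 (if flag = true then (0:Int) else 1) (x :: xs)
            = pvLoopB (x :: xs) (if flag = true then (0:Int) else 1) := by simp [runTail]
        rw [hR, loopB_cons]

-- ===== B-side characterisation: the rolling DP flags =====

-- 'l splits into equal-char triples'
def used3 : List Char → Bool
  | [] => true
  | a :: b :: c :: rest => a == b && b == c && used3 rest
  | _ => false

-- 'l splits into equal-char triples plus exactly one equal pair'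
def free1 : List Char → Bool
  | [a, b] => a == b
  | a :: b :: c :: rest => (a == b && used3 (c :: rest)) || (a == b && b == c && free1 rest)
  | _ => false

def uDrop1 : List Char → Bool
  | [] => false
  | _ :: t => used3 t

def uDrop2 : List Char → Bool
  | _ :: _ :: t => used3 t
  | _ => false

def fDrop1 : List Char → Bool
  | [] => false
  | _ :: t => free1 t

def fDrop2 : List Char → Bool
  | _ :: _ :: t => free1 t
  | _ => false

-- the fold invariant: after processing suffix l (right to left) the rolling state holds the
-- DP values of l and its two shorter suffixes (out of range = false)
theorem foldB_inv (l : List Char) :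
    l.reverse.foldl pvStepB (none, none, true, false, false, false, false, false)
      = (l.head?, l.tail.head?, used3 l, uDrop1 l, uDrop2 l, free1 l, fDrop1 l, fDrop2 l) := by
  induction l with
  | nil => rfl
  | cons c l ih =>
    rw [List.reverse_cons, List.foldl_append, ih]
    match l with
    | [] => simp [pvStepB, used3, free1, uDrop1, uDrop2, fDrop1, fDrop2]
    | [b] => simp [pvStepB, used3, free1, uDrop1, uDrop2, fDrop1, fDrop2]
    | b :: d :: t => simp [pvStepB, used3, free1, uDrop1, uDrop2, fDrop1, fDrop2]

theorem alt_eq_free1 (s : String) : isDecomposable_alt s = free1 s.toList := by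
  unfold isDecomposable_alt
  rw [foldB_inv]

-- dropWhile = drop (length of takeWhile)
theorem dropWhile_eq_drop_tw (p : Char → Bool) (l : List Char) :
    l.dropWhile p = l.drop (l.takeWhile p).length := by
  induction l with
  | nil => rfl
  | cons a l ih =>
    by_cases h : p a
    · simp [h, ih]
    · simp [h]

theorem takeWhile_eq_replicate (c : Char) (l : List Char) :
    l.takeWhile (fun x => x == c)
      = List.replicate (l.takeWhile (fun x => x == c)).length c := by
  have := List.eq_replicate_of_mem (a := c) (l := l.takeWhile (fun x => x == c))
    (fun b hb => by simpa using List.mem_takeWhile_imp hb)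
  exact this

-- used3 over a maximal run: only the remainder of the run length matters
theorem used3_replicate (k : Nat) (c : Char) (z : List Char)
    (hz : ∀ d t, z = d :: t → (d == c) = false) :
    ∀ m, m ≤ k → used3 (List.replicate m c ++ z) = (decide (m % 3 = 0) && used3 z) := by
  induction k with
  | zero => intro m hm; have : m = 0 := by omega
            subst this; simp
  | succ k ih =>
    intro m hm
    match m with
    | 0 => simp
    | 1 =>
      match z, hz with
      | [], _ => simp [used3]
      | [d], hz => simp [used3]
      | d :: e :: t, hz =>
        have hdc : ¬ c = d := by
          have h := hz d (e :: t) rfl; simp at h; exact fun hc => h hc.symm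
        simp [used3, hdc]
    | 2 =>
      match z, hz with
      | [], _ => simp [used3]
      | d :: t, hz =>
        have hdc : ¬ c = d := by
          have h := hz d t rfl; simp at h; exact fun hc => h hc.symm
        simp [used3, hdc]
    | (m + 3) =>
      have h1 : List.replicate (m + 3) c ++ z = c :: c :: c :: (List.replicate m c ++ z) := by
        simp [List.replicate_succ]
      rw [h1, used3]
      rw [ih m (by omega)]
      have h2 : (m + 3) % 3 = m % 3 := by omega
      simp [h2]

theorem used3_rep (c : Char) (z : List Char)
    (hz : ∀ d t, z = d :: t → (d == c) = false) (m : Nat) :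
    used3 (List.replicate m c ++ z) = (decide (m % 3 = 0) && used3 z) :=
  used3_replicate m c z hz m le_rfl

-- free1 over a maximal run
theorem free1_replicate (k : Nat) (c : Char) (z : List Char)
    (hz : ∀ d t, z = d :: t → (d == c) = false) :
    ∀ m, m ≤ k →
      free1 (List.replicate m c ++ z)
        = (if m % 3 = 1 then false else if m % 3 = 2 then used3 z else free1 z) := by
  induction k with
  | zero => intro m hm; have : m = 0 := by omega
            subst this; simp
  | succ k ih =>
    intro m hm
    match m with
    | 0 => simp
    | 1 =>
      match z, hz with
      | [], _ => simp [free1]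
      | [d], hz =>
        have hdc : ¬ c = d := by
          have h := hz d [] rfl; simp at h; exact fun hc => h hc.symm
        simp [free1, hdc]
      | d :: e :: t, hz =>
        have hdc : ¬ c = d := by
          have h := hz d (e :: t) rfl; simp at h; exact fun hc => h hc.symm
        simp [free1, hdc]
    | 2 =>
      match z, hz with
      | [], _ => simp [free1, used3]
      | d :: t, hz =>
        have hdc : ¬ c = d := by
          have h := hz d t rfl; simp at h; exact fun hc => h hc.symm
        simp [free1, hdc]
    | (m + 3) =>
      have h1 : List.replicate (m + 3) c ++ z = c :: c :: c :: (List.replicate m c ++ z) := by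
        simp [List.replicate_succ]
      rw [h1, free1]
      have hu : (c :: (List.replicate m c ++ z)) = List.replicate (m + 1) c ++ z := by
        simp [List.replicate_succ]
      rw [hu, used3_rep c z hz (m + 1), ih m (by omega)]
      have h3 : m % 3 = 0 ∨ m % 3 = 1 ∨ m % 3 = 2 := by omega
      rcases h3 with h3 | h3 | h3 <;>
        · have h4 : (m + 1) % 3 = (m % 3 + 1) % 3 := by omega
          have h5 : (m + 3) % 3 = m % 3 := by omega
          simp [h3, h4, h5]

theorem free1_rep (c : Char) (z : List Char)
    (hz : ∀ d t, z = d :: t → (d == c) = false) (m : Nat) :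
    free1 (List.replicate m c ++ z)
      = (if m % 3 = 1 then false else if m % 3 = 2 then used3 z else free1 z) :=
  free1_replicate m c z hz m le_rfl

-- joint characterisation: the DP flags equal the run-length scan
theorem dp_eq_loopB : ∀ n (l : List Char), l.length ≤ n →
    used3 l = pvLoopB l 1 ∧ free1 l = pvLoopB l 0 := by
  intro n
  induction n with
  | zero =>
    intro l hl
    have : l = [] := by
      cases l with
      | nil => rfl
      | cons a t => simp at hl
    subst this
    constructor <;> simp [used3, free1, pvLoopB]
  | succ n ih =>
    intro l hl
    match l with
    | [] => constructor <;> simp [used3, free1, pvLoopB]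
    | c :: rest =>
      have hk : rest.drop (rest.takeWhile (fun x => x == c)).length
          = rest.dropWhile (fun x => x == c) :=
        (dropWhile_eq_drop_tw _ rest).symm
      have hz : ∀ d t, rest.drop (rest.takeWhile (fun x => x == c)).length = d :: t →
          (d == c) = false := by
        intro d t hdt
        have h := List.head?_dropWhile_not (fun x => x == c) rest
        rw [← hk] at h
        rw [hdt] at h
        simpa using h
      have hrest : rest = List.replicate (rest.takeWhile (fun x => x == c)).length c
          ++ rest.drop (rest.takeWhile (fun x => x == c)).length := by
        conv_lhs => rw [← List.takeWhile_append_dropWhile (p := fun x => x == c) (l := rest)]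
        rw [hk]
        congr 1
        exact takeWhile_eq_replicate c rest
      have hcons : c :: rest = List.replicate ((rest.takeWhile (fun x => x == c)).length + 1) c
          ++ rest.drop (rest.takeWhile (fun x => x == c)).length := by
        conv_lhs => rw [hrest]
        simp [List.replicate_succ]
      have hzlen : (rest.drop (rest.takeWhile (fun x => x == c)).length).length ≤ n := by
        have h1 := List.length_drop (l := rest) (i := (rest.takeWhile (fun x => x == c)).length)
        simp only [List.length_cons] at hl
        omega
      obtain ⟨ihu, ihf⟩ := ih _ hzlen
      have hr3 : (rest.takeWhile (fun x => x == c)).length % 3 = 0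
          ∨ (rest.takeWhile (fun x => x == c)).length % 3 = 1
          ∨ (rest.takeWhile (fun x => x == c)).length % 3 = 2 := by omega
      constructor
      · rw [loopB_cons]
        conv_lhs => rw [hcons, used3_rep c _ hz]
        rw [ihu]
        unfold runTail
        rcases hr3 with h3 | h3 | h3
        · have hi : ((1:Int) + (rest.takeWhile (fun x => x == c)).length) % 3 = 1 := by omega
          have hn : ((rest.takeWhile (fun x => x == c)).length + 1) % 3 = 1 := by omega
          simp [hi, hn]
        · have hi : ((1:Int) + (rest.takeWhile (fun x => x == c)).length) % 3 = 2 := by omega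
          have hn : ((rest.takeWhile (fun x => x == c)).length + 1) % 3 = 2 := by omega
          simp [hi, hn]
        · have hi : ((1:Int) + (rest.takeWhile (fun x => x == c)).length) % 3 = 0 := by omega
          have hn : ((rest.takeWhile (fun x => x == c)).length + 1) % 3 = 0 := by omega
          simp [hi, hn]
      · rw [loopB_cons]
        conv_lhs => rw [hcons, free1_rep c _ hz]
        unfold runTail
        rcases hr3 with h3 | h3 | h3
        · have hi : ((1:Int) + (rest.takeWhile (fun x => x == c)).length) % 3 = 1 := by omega
          have hn : ((rest.takeWhile (fun x => x == c)).length + 1) % 3 = 1 := by omega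
          simp [hi, hn]
        · have hi : ((1:Int) + (rest.takeWhile (fun x => x == c)).length) % 3 = 2 := by omega
          have hn : ((rest.takeWhile (fun x => x == c)).length + 1) % 3 = 2 := by omega
          simp [hi, hn, ihu]
        · have hi : ((1:Int) + (rest.takeWhile (fun x => x == c)).length) % 3 = 0 := by omega
          have hn : ((rest.takeWhile (fun x => x == c)).length + 1) % 3 = 0 := by omega
          simp [hi, hn, ihf]

-- the previous final assembly for A: A equals the run-length scan
theorem A_eq_loopB (s : String) (hpre : s ≠ "") :
    isDecomposable s = pvLoopB s.toList 0 := by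
  unfold isDecomposable
  cases hsl : s.toList with
  | nil => exact absurd (String.toList_eq_nil_iff.mp hsl) hpre
  | cons c rest =>
    have : (match c :: rest with
      | [] => false
      | c :: rest => pvLoopA rest c 1 true) = pvLoopA rest c 1 true := rfl
    rw [this, loopA_eq rest c 1 true (by omega) (by omega), loopB_cons]
    simp

-- ===== VERDICT (by name: the statement is the Claim_ definition above) =====
theorem isDecomposable_spec : Claim_equal_isDecomposable := by
  intro s _ hpre
  unfold Spec_isDecomposable
  rw [A_eq_loopB s hpre, alt_eq_free1]
  exact ((dp_eq_loopB s.toList.length s.toList le_rfl).2).symm
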